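-- pv_equiv track=rewrite | github.com/ericbgarnick/AOC | 2018/day20/day20.py | get_splits
-- ===== SOURCE A (Python) =====
-- from typing import List, Dict
--
-- SPLIT = '|'
--
-- OPEN = '('
--
-- CLOSE = ')'
--
-- def get_splits(route_segment: str) -> List[int]:
--     nesting = 0
--     splits = []
--     for i, symbol in enumerate(route_segment):
--         if symbol == SPLIT and not nesting:
--             splits.append(i)
--         elif symbol == OPEN:
--             nesting += 1
--         elif symbol == CLOSE:
--             nesting -= 1
--         else:
--             pass
--     return splits
-- ===== SOURCE B (Python) =====
-- def get_splits(route_segment: str):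
--     # Stateless characterization: '|' at index i is top-level exactly when the
--     # prefix before i contains equally many '(' and ')'. No running counter.
--     return [i for i, c in enumerate(route_segment)
--             if c == '|'
--             and route_segment[:i].count('(') == route_segment[:i].count(')')]
-- ===== Notes on version B (the rewrite author's own statement) =====
-- stated objective: simpler
-- what changed: Replaces A's stateful scan with a running nesting counter by a stateless one-line characterization: an index is kept iff its character is '|' and the prefix before it has equally many '(' and ')' (prefix counts via slicing), trading O(n) for O(n^2).
import Mathlib
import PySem

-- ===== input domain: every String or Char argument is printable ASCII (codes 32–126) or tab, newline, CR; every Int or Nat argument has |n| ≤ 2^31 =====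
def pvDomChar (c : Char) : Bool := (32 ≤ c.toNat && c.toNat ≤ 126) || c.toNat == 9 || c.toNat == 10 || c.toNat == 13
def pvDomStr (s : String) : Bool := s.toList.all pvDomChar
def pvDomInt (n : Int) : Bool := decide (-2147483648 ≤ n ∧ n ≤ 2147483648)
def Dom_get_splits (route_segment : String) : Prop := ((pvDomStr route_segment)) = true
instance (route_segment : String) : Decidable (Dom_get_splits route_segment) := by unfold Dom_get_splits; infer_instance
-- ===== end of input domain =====

-- B drops A's running nesting counter: it keeps index i iff the character is '|' and the
-- prefix before i has equally many '(' and ')' (stateless prefix counts; simpler, O(n^2)).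

-- ===== PORT A =====
-- A's loop body: state (nesting, splits), branches in A's order
def pvStepA (st : Int × List Int) (p : Int × Char) : Int × List Int :=
  if p.2 == '|' && st.1 == 0 then (st.1, st.2 ++ [p.1])
  else if p.2 == '(' then (st.1 + 1, st.2)
  else if p.2 == ')' then (st.1 - 1, st.2)
  else st

-- literal port of A: one pass over enumerate(route_segment) carrying (nesting, splits)
def get_splits (route_segment : String) : List Int :=
  (List.foldl pvStepA ((0 : Int), ([] : List Int))
    (PySem.List.enumerate route_segment.toList)).2

-- ===== PORT B =====
-- literal port of B: one comprehension; the test counts '(' and ')' in the slice s[:i]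
def get_splits_alt (route_segment : String) : List Int :=
  ((PySem.List.enumerate route_segment.toList).filter
      (fun p => p.2 == '|' &&
        ((PySem.List.slice route_segment.toList none (some p.1)).count '(' ==
         (PySem.List.slice route_segment.toList none (some p.1)).count ')'))).map (fun p => p.1)

-- ===== PRECONDITION & SPEC =====
def Spec_get_splits (route_segment : String) (out : List Int) : Prop := out = get_splits_alt route_segment
instance (route_segment : String) (out : List Int) : Decidable (Spec_get_splits route_segment out) := by unfold Spec_get_splits; infer_instance

-- ===== CLAIM =====
def Claim_equal_get_splits : Prop := ∀ (route_segment : String), Dom_get_splits route_segment → Spec_get_splits route_segment (get_splits route_segment)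

-- ===== LEMMAS AND PROOFS =====

-- the per-character change of the nesting level
def pvDelta (c : Char) : Int := (if c = '(' then 1 else 0) - (if c = ')' then 1 else 0)

-- reference recursion: indices (from i) of '|' at nesting level 0, starting at level n
def pvGo (cs : List Char) (n : Int) (i : Int) : List Int :=
  match cs with
  | [] => []
  | c :: cs => (if c = '|' ∧ n = 0 then [i] else []) ++ pvGo cs (n + pvDelta c) (i + 1)

-- the paren-count imbalance of a prefix
def pvDiff (pre : List Char) : Int := (pre.count '(' : Int) - (pre.count ')' : Int)

theorem pvDiff_append_singleton (pre : List Char) (c : Char) :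
    pvDiff (pre ++ [c]) = pvDiff pre + pvDelta c := by
  simp [pvDiff, pvDelta, List.count_append, List.count_singleton]
  by_cases h1 : c = '(' <;> by_cases h2 : c = ')' <;>
    simp_all <;> omega

theorem pvStepA_eq (n : Int) (s : List Int) (i : Int) (c : Char) :
    pvStepA (n, s) (i, c) = (n + pvDelta c, s ++ (if c = '|' ∧ n = 0 then [i] else [])) := by
  by_cases hc : c = '|'
  · subst hc
    by_cases hn : n = 0 <;> simp [pvStepA, pvDelta, hn]
  · by_cases h1 : c = '('
    · subst h1; simp [pvStepA, pvDelta]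
    · by_cases h2 : c = ')'
      · subst h2; simp [pvStepA, pvDelta]; ring
      · simp [pvStepA, pvDelta, hc, h1, h2]

theorem pvA_go (cs : List Char) : ∀ (n : Int) (s : List Int) (i : Int),
    (List.foldl pvStepA (n, s) (PySem.List.enumerate cs i)).2 = s ++ pvGo cs n i := by
  induction cs with
  | nil => intro n s i; simp [PySem.List.enumerate_nil, pvGo]
  | cons c cs ih =>
    intro n s i
    rw [PySem.List.enumerate_cons, List.foldl_cons, pvStepA_eq, ih, pvGo]
    simp

theorem pvB_go (full : List Char) : ∀ (cs pre : List Char), full = pre ++ cs →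
    (((PySem.List.enumerate cs (pre.length : Int)).filter
        (fun p => p.2 == '|' &&
          ((PySem.List.slice full none (some p.1)).count '(' ==
           (PySem.List.slice full none (some p.1)).count ')'))).map (fun p => p.1))
      = pvGo cs (pvDiff pre) (pre.length : Int) := by
  intro cs
  induction cs with
  | nil => intro pre _; simp [pvGo, PySem.List.enumerate_nil]
  | cons c cs ih =>
    intro pre hfull
    have hsl : PySem.List.slice full none (some (pre.length : Int)) = pre := by
      rw [PySem.List.slice_to_natCast, hfull]
      simp
    have hnext := ih (pre ++ [c]) (by simp [hfull])
    have hidx : ((pre.length : Int) + 1) = (((pre ++ [c]).length : Nat) : Int) := by simp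
    rw [PySem.List.enumerate_cons, List.filter_cons, pvGo]
    by_cases h : c = '|' ∧ pvDiff pre = 0
    · obtain ⟨hc, hd⟩ := h
      have hcnt : pre.count '(' = pre.count ')' := by unfold pvDiff at hd; omega
      have hct : (((pre.length : Int), c).2 == '|' &&
          ((PySem.List.slice full none (some ((pre.length : Int), c).1)).count '(' ==
           (PySem.List.slice full none (some ((pre.length : Int), c).1)).count ')')) = true := by
        simp [hsl, hc, hcnt]
      rw [hct, if_pos rfl, if_pos ⟨hc, hd⟩, List.map_cons, hidx, hnext,
        pvDiff_append_singleton]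
      simp
    · have hcf : (((pre.length : Int), c).2 == '|' &&
          ((PySem.List.slice full none (some ((pre.length : Int), c).1)).count '(' ==
           (PySem.List.slice full none (some ((pre.length : Int), c).1)).count ')')) = false := by
        rcases not_and_or.mp h with h' | h'
        · simp [h']
        · have hne : pre.count '(' ≠ pre.count ')' := fun he => h' (by unfold pvDiff; omega)
          simp [hsl, hne]
      rw [hcf, if_neg Bool.false_ne_true, if_neg h, hidx, hnext, pvDiff_append_singleton]
      simp

theorem pvA_eq_B (s : String) : get_splits s = get_splits_alt s := by
  unfold get_splits get_splits_alt
  rw [pvA_go]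
  have := pvB_go s.toList s.toList [] (by simp)
  simpa [pvDiff] using this.symm

-- ===== VERDICT =====
theorem get_splits_spec : Claim_equal_get_splits := by
  intro s _
  unfold Spec_get_splits
  exact pvA_eq_B s
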